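-- pv_equiv track=rewrite | github.com/robinoscarsson/magic_shell | magic_shell/core/config.py | _format_command_list
-- ===== SOURCE A (Python) =====
-- from typing import Dict, Any, Optional, List
--
-- def _format_command_list(commands: List[str]) -> str:
--     """Format command list for TOML."""
--     formatted = []
--     for i, cmd in enumerate(sorted(commands)):
--         if i % 6 == 0:  # New line every 6 commands
--             formatted.append(f'\n    "{cmd}"')
--         else:
--             formatted.append(f'"{cmd}"')
--     return ', '.join(formatted)
-- ===== SOURCE B (Python) =====
-- def _format_command_list(commands):
--     """Format command list for TOML."""
--     cmds = sorted(commands)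
--     parts = []
--     for start in range(0, len(cmds), 6):
--         chunk = cmds[start:start + 6]
--         parts.append('\n    ' + ', '.join('"' + c + '"' for c in chunk))
--     return ', '.join(parts)
-- ===== Notes on version B (the rewrite author's own statement) =====
-- stated objective: alternative
-- what changed: Replaces A's per-element enumerate loop with an i % 6 == 0 branch by a chunk-wise traversal: sort once, slice the sorted list into groups of six, quote-and-join each group with a '\n ' prefix, then join the groups.
import Mathlib
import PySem

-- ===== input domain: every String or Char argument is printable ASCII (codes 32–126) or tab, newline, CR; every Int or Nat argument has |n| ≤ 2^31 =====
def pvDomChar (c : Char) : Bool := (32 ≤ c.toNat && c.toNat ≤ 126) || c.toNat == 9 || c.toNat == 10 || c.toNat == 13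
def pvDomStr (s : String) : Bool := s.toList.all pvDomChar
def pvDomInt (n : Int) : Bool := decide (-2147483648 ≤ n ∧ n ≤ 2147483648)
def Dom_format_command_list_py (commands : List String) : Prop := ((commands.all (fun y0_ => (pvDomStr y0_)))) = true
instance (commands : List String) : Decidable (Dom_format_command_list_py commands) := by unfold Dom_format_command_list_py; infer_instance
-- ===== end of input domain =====

-- B replaces A's per-element `i % 6 == 0` branch over the enumerated sorted list by a
-- chunk-wise traversal (slice off six commands at a time, quote-and-join each chunk);
-- objective: alternative decomposition, same cost.

-- ===== PORT A =====
def format_command_list_py (commands : List String) : String :=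
  let formatted : List String :=
    (PySem.List.enumerate (PySem.List.sorted commands (fun c => c)) 0).foldl
      (fun acc p =>
        if PySem.Int.mod p.1 6 == 0 then acc ++ ["\n    \"" ++ p.2 ++ "\""]
        else acc ++ ["\"" ++ p.2 ++ "\""]) []
  PySem.Str.join ", " formatted

-- ===== PORT B =====
def format_command_list_py_alt (commands : List String) : String :=
  let cmds := PySem.List.sorted commands (fun c => c)
  let parts : List String :=
    (PySem.List.pyRange 0 (cmds.length : Int) 6).foldl
      (fun parts start =>
        parts ++ ["\n    " ++ PySem.Str.join ", "
          ((PySem.List.slice cmds (some start) (some (start + 6))).map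
            (fun c => "\"" ++ c ++ "\""))]) []
  PySem.Str.join ", " parts

-- ===== PRECONDITION & SPEC =====
def Spec_format_command_list_py (commands : List String) (out : String) : Prop := out = format_command_list_py_alt commands
instance (commands : List String) (out : String) : Decidable (Spec_format_command_list_py commands out) := by unfold Spec_format_command_list_py; infer_instance

-- ===== CLAIM (what is proved, stated in full; the proofs are below) =====
def Claim_equal_format_command_list_py : Prop := ∀ (commands : List String), Dom_format_command_list_py commands → Spec_format_command_list_py commands (format_command_list_py commands)

-- ===== LEMMAS AND PROOFS =====

-- proof-side view of B's chunk loop: peel six commands at a time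
def pvAltChunks (l : List String) : List String :=
  match l with
  | [] => []
  | x :: rest =>
    ("\n    " ++ PySem.Str.join ", " (((x :: rest).take 6).map (fun c => "\"" ++ c ++ "\"")))
      :: pvAltChunks ((x :: rest).drop 6)
termination_by l.length
decreasing_by simp

-- A's per-element formatter (what its loop appends for entry p)
def pvG (p : Int × String) : String :=
  if PySem.Int.mod p.1 6 == 0 then "\n    \"" ++ p.2 ++ "\"" else "\"" ++ p.2 ++ "\""

lemma pv_mod6 (a : Int) : PySem.Int.mod a 6 = a % 6 :=
  Int.fmod_eq_emod_of_nonneg a (by norm_num)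

lemma pv_foldl_map (l : List (Int × String)) (acc : List String) :
    l.foldl (fun acc p =>
        if PySem.Int.mod p.1 6 == 0 then acc ++ ["\n    \"" ++ p.2 ++ "\""]
        else acc ++ ["\"" ++ p.2 ++ "\""]) acc = acc ++ l.map pvG := by
  induction l generalizing acc with
  | nil => simp
  | cons p t ih =>
    rw [List.foldl_cons, ih]
    unfold pvG
    by_cases h : (PySem.Int.mod p.1 6 == 0) = true
    · rw [if_pos h, List.map_cons, if_pos h, List.append_assoc, List.singleton_append]
    · rw [if_neg h, List.map_cons, if_neg h, List.append_assoc, List.singleton_append]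

-- periodicity: A's formatter only looks at the index mod 6
lemma pv_period (xs : List String) (k : Int) :
    (PySem.List.enumerate xs (k + 6)).map pvG = (PySem.List.enumerate xs k).map pvG := by
  induction xs generalizing k with
  | nil => simp [PySem.List.enumerate]
  | cons a t ih =>
    simp only [PySem.List.enumerate_cons, List.map_cons]
    have h1 : PySem.Int.mod (k + 6) 6 = PySem.Int.mod k 6 := by
      simp only [pv_mod6]; omega
    have h2 : k + 6 + 1 = (k + 1) + 6 := by ring
    rw [h2, ih (k + 1), pvG, pvG, h1]

-- peeling the rest of a chunk: from an index 1 ≤ k ≤ 5 the next 6-k entries are plain-quoted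
lemma pv_peel (xs : List String) (k : Nat) (h1 : 1 ≤ k) (h5 : k ≤ 5) :
    (PySem.List.enumerate xs (k : Int)).map pvG =
      (xs.take (6 - k)).map (fun c => "\"" ++ c ++ "\"")
        ++ (PySem.List.enumerate (xs.drop (6 - k)) 0).map pvG := by
  induction xs generalizing k with
  | nil => simp [PySem.List.enumerate]
  | cons a t ih =>
    have hmod : PySem.Int.mod (k : Int) 6 ≠ 0 := by
      simp only [pv_mod6]; omega
    have hbeq : (PySem.Int.mod (k : Int) 6 == 0) = false := beq_eq_false_iff_ne.mpr hmod
    have hG : pvG ((k : Int), a) = "\"" ++ a ++ "\"" := by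
      unfold pvG; rw [hbeq]; simp
    simp only [PySem.List.enumerate_cons, List.map_cons, hG]
    rcases Nat.lt_or_ge k 5 with hk | hk
    · have hc : ((k : Int) + 1) = ((k + 1 : Nat) : Int) := by push_cast; ring
      rw [hc, ih (k + 1) (by omega) (by omega)]
      have h6 : 6 - k = (5 - k) + 1 := by omega
      rw [h6, List.take_succ_cons, List.drop_succ_cons, List.map_cons, List.cons_append]
      have h7 : 6 - (k + 1) = 5 - k := by omega
      rw [h7]
    · have hk5 : k = 5 := by omega
      subst hk5
      have hc : (((5 : Nat) : Int) + 1) = (0 : Int) + 6 := by norm_num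
      rw [hc, pv_period t 0]
      simp

-- join over (p ++ a) :: ys pulls the prefix p out
lemma pv_join_prefix (sep p a : List Char) (ys : List (List Char)) :
    PySem.Chars.join sep ((p ++ a) :: ys) = p ++ PySem.Chars.join sep (a :: ys) := by
  cases ys with
  | nil => simp [PySem.Chars.join_singleton]
  | cons b t =>
    simp [PySem.Chars.join_cons_cons, List.append_assoc]

-- join over a cons-list followed by a nonempty tail splits at the boundary
lemma pv_join_split (sep a : List Char) (ys : List (List Char)) (z : List Char)
    (zs : List (List Char)) :
    PySem.Chars.join sep (a :: (ys ++ z :: zs)) =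
      PySem.Chars.join sep (a :: ys) ++ sep ++ PySem.Chars.join sep (z :: zs) := by
  induction ys generalizing a with
  | nil => simp [PySem.Chars.join_cons_cons, PySem.Chars.join_singleton]
  | cons b t ih =>
    simp only [List.cons_append, PySem.Chars.join_cons_cons, ih b]
    simp [List.append_assoc]

-- pv_peel at k = 1: the five entries after a chunk head are plain-quoted
lemma pv_peel1 (xs : List String) :
    (PySem.List.enumerate xs 1).map pvG =
      (xs.take 5).map (fun c => "\"" ++ c ++ "\"")
        ++ (PySem.List.enumerate (xs.drop 5) 0).map pvG := by
  have h := pv_peel xs 1 (by norm_num) (by norm_num)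
  simpa only [show (6 : Nat) - 1 = 5 by norm_num, Nat.cast_one] using h

-- the main chunk lemma: A's joined enumeration equals B's joined chunks
lemma pv_main (xs : List String) :
    PySem.Chars.join ", ".toList (((PySem.List.enumerate xs 0).map pvG).map String.toList) =
      PySem.Chars.join ", ".toList ((pvAltChunks xs).map String.toList) := by
  induction xs using pvAltChunks.induct with
  | case1 => simp [pvAltChunks, PySem.List.enumerate]
  | case2 x rest ih =>
    have hG0 : pvG (0, x) = "\n    \"" ++ x ++ "\"" := by
      unfold pvG; norm_num [pv_mod6]
    have h01 : (0 : Int) + 1 = (1 : Int) := by norm_num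
    have hx : ("\n    \"" ++ x ++ "\"").toList =
        "\n    ".toList ++ ("\"" ++ x ++ "\"").toList := by simp
    have hchunk : ("\n    " ++ PySem.Str.join ", "
          (((x :: rest).take 6).map (fun c => "\"" ++ c ++ "\""))).toList =
        "\n    ".toList ++ PySem.Chars.join ", ".toList
          (("\"" ++ x ++ "\"").toList ::
            ((rest.take 5).map (fun c => "\"" ++ c ++ "\"")).map String.toList) := by
      simp [PySem.Str.toList_join, List.map_map]
    rw [pvAltChunks]
    simp only [PySem.List.enumerate_cons, List.map_cons, hG0, h01, pv_peel1, List.map_append]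
    cases hdrop : rest.drop 5 with
    | nil =>
      have hd6 : (x :: rest).drop 6 = [] := by simpa using hdrop
      simp only [hd6, pvAltChunks, List.map_nil]
      rw [show (PySem.List.enumerate ([] : List String) 0).map pvG = [] from rfl]
      simp only [List.map_nil, List.append_nil]
      rw [hx, pv_join_prefix, PySem.Chars.join_singleton, hchunk]
    | cons z zs =>
      have hd6 : (x :: rest).drop 6 = z :: zs := by simpa using hdrop
      rw [hd6] at ih
      rw [hd6]
      have htailA : (List.map pvG (PySem.List.enumerate (z :: zs) 0)).map String.toList =
          (pvG (0, z)).toList ::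
            (List.map pvG (PySem.List.enumerate zs (0 + 1))).map String.toList := by
        rw [PySem.List.enumerate_cons, List.map_cons, List.map_cons]
      obtain ⟨c, cs, hB⟩ : ∃ c cs, pvAltChunks (z :: zs) = c :: cs := by
        rw [pvAltChunks]; exact ⟨_, _, rfl⟩
      rw [htailA] at ih ⊢
      rw [hB] at ih ⊢
      simp only [List.map_cons] at ih ⊢
      rw [hx, pv_join_split, pv_join_prefix, ih, PySem.Chars.join_cons_cons, hchunk]

-- range(a, b, 6) peels its first element while a < b
lemma pv_pyRange6_cons (a b : Int) (h : a < b) :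
    PySem.List.pyRange a b 6 = a :: PySem.List.pyRange (a + 6) b 6 := by
  rw [PySem.List.pyRange_of_pos a b (by norm_num),
    PySem.List.pyRange_of_pos (a + 6) b (by norm_num), if_pos h]
  have hc : ((b - a + 6 - 1) / 6).toNat =
      (if a + 6 < b then ((b - (a + 6) + 6 - 1) / 6).toNat else 0) + 1 := by
    split_ifs <;> omega
  rw [hc, List.range_succ_eq_map, List.map_cons, List.map_map]
  refine List.cons_eq_cons.mpr ⟨by push_cast; ring, ?_⟩
  apply List.map_congr_left
  intro k _
  simp only [Function.comp_apply]
  push_cast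
  ring

lemma pv_pyRange6_nil (a b : Int) (h : b ≤ a) : PySem.List.pyRange a b 6 = [] := by
  rw [PySem.List.pyRange_of_pos a b (by norm_num), if_neg (by omega)]
  simp

-- B's indexed loop over range(0, len, 6) builds exactly the take/drop chunks
lemma pv_parts (xs : List String) :
    ∀ (n j : Nat) (acc : List String), xs.length - j = n →
      (PySem.List.pyRange (j : Int) (xs.length : Int) 6).foldl
        (fun parts start =>
          parts ++ ["\n    " ++ PySem.Str.join ", "
            ((PySem.List.slice xs (some start) (some (start + 6))).map
              (fun c => "\"" ++ c ++ "\""))]) acc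
        = acc ++ pvAltChunks (xs.drop j) := by
  intro n
  induction n using Nat.strong_induction_on with
  | _ n IH =>
    intro j acc hn
    rcases Nat.lt_or_ge j xs.length with hj | hj
    · rw [pv_pyRange6_cons _ _ (by exact_mod_cast hj), List.foldl_cons]
      have hslice : PySem.List.slice xs (some (j : Int)) (some ((j : Int) + 6)) =
          (xs.drop j).take 6 := by
        have h6 : ((j : Int) + 6) = ((j : Int) + ((6 : Nat) : Int)) := by push_cast; ring
        rw [h6, PySem.List.slice_natCast_add]
      have hcast : ((j : Int) + 6) = (((j + 6 : Nat)) : Int) := by push_cast; ring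
      rw [hslice, hcast, IH (xs.length - (j + 6)) (by omega) (j + 6) _ rfl]
      obtain ⟨y, t, hyt⟩ : ∃ y t, xs.drop j = y :: t := by
        cases hx : xs.drop j with
        | nil => exact absurd (List.drop_eq_nil_iff.mp hx) (by omega)
        | cons y t => exact ⟨y, t, rfl⟩
      have hdd : xs.drop (j + 6) = (xs.drop j).drop 6 := by
        rw [List.drop_drop]
      rw [hdd, hyt, pvAltChunks, List.append_assoc, List.singleton_append]
    · rw [pv_pyRange6_nil _ _ (by exact_mod_cast hj), List.foldl_nil,
        List.drop_eq_nil_iff.mpr (by omega)]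
      rw [pvAltChunks, List.append_nil]

-- ===== VERDICT (by name: the statement is the Claim_ definition above) =====
theorem format_command_list_py_spec : Claim_equal_format_command_list_py := by
  intro commands _
  unfold Spec_format_command_list_py format_command_list_py format_command_list_py_alt
  dsimp only
  have hparts := pv_parts (PySem.List.sorted commands (fun c => c))
    (PySem.List.sorted commands (fun c => c)).length 0 [] (by omega)
  simp only [Nat.cast_zero, List.drop_zero, List.nil_append] at hparts
  rw [hparts]
  apply String.toList_inj.mp
  rw [pv_foldl_map]
  simp only [List.nil_append, PySem.Str.toList_join]
  exact pv_main (PySem.List.sorted commands (fun c => c))
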